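-- pv_equiv track=rewrite | github.com/Aasthaengg/IBMdataset | Python_codes/p03229/s680458499.py | calc
-- ===== SOURCE A (Python) =====
-- from collections import deque
--
-- def calc(A,first,flip):
--   q = deque(A)
--   ans = 0
--   cur = first
--   while q:
--     if flip:
--       a = q.popleft()
--     else:
--       a = q.pop()
--     ans += abs(a - cur)
--     cur = a
--     flip^=True
--   return ans
-- ===== SOURCE B (Python) =====
-- def calc(A, first, flip):
--     # Zig-zag order built from slices: the side that starts contributes the
--     # ceil(n/2) elements xs, the other side ys; interleave, then reduce.
--     n = len(A)
--     k = (n + 1) // 2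
--     if flip:
--         xs, ys = A[:k], A[k:][::-1]
--     else:
--         xs, ys = A[n - k:][::-1], A[:n - k]
--     seq = [first]
--     for a, b in zip(xs, ys):
--         seq += [a, b]
--     if len(xs) > len(ys):
--         seq.append(xs[-1])
--     return sum(abs(b - a) for a, b in zip(seq, seq[1:]))
-- ===== Notes on version B (the rewrite author's own statement) =====
-- stated objective: alternative
-- what changed: A fuses everything into one deque loop that toggles a flip flag, popping left/right and accumulating; B has no toggling loop at all: it splits A by slicing into the ceil(n/2) elements taken from the starting side and the reversed rest, interleaves the two slices with zip, and sums adjacent absolute differences in a separate reduction pass.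
import Mathlib
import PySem

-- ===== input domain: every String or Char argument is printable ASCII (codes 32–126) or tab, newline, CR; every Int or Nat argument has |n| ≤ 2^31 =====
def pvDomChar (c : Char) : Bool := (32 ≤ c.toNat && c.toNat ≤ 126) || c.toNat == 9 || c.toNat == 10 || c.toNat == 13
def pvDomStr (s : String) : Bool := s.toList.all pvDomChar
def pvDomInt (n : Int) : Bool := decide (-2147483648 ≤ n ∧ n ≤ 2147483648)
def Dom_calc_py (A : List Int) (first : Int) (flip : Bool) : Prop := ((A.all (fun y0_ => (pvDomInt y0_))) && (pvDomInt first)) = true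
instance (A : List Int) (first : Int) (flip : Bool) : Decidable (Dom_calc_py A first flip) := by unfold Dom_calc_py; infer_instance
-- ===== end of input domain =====

-- B replaces A's fused flip-toggling deque loop by slicing A into the two contributing
-- halves, interleaving them, and reducing in a separate pass.
-- ===== PORT A =====
-- Literal port of A's while-loop over the deque: popleft = head, pop = last element.
def calcLoop (q : List Int) (ans cur : Int) (flip : Bool) : Int :=
  if h : q = [] then ans
  else
    let a := if flip then q.head h else q.getLast h
    let q' := if flip then q.tail else q.dropLast
    calcLoop q' (ans + |a - cur|) a (!flip)
termination_by q.length
decreasing_by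
  rcases q with _ | ⟨x, xs⟩
  · exact absurd rfl h
  · split <;> simp [List.length_dropLast]

def calc_py (A : List Int) (first : Int) (flip : Bool) : Int :=
  calcLoop A 0 first flip

-- ===== PORT B =====
def calc_py_alt (A : List Int) (first : Int) (flip : Bool) : Int :=
  let n : Int := A.length
  let k : Int := PySem.Int.floordiv (n + 1) 2
  -- A[:k], A[k:][::-1]  /  A[n-k:][::-1], A[:n-k]   ([::-1] = reverse, cf. slice?_none_none_neg_one)
  let xy :=
    if flip then (PySem.List.slice A none (some k), (PySem.List.slice A (some k) none).reverse)
    else ((PySem.List.slice A (some (n - k)) none).reverse, PySem.List.slice A none (some (n - k)))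
  let xs := xy.1
  let ys := xy.2
  -- for a, b in zip(xs, ys): seq += [a, b]
  let seq := (xs.zip ys).foldl (fun s p => s ++ [p.1, p.2]) [first]
  -- if len(xs) > len(ys): seq.append(xs[-1])   (the guard makes xs nonempty, so xs[-1] = getLastD)
  let seq := if ys.length < xs.length then seq ++ [xs.getLastD 0] else seq
  -- sum(abs(b - a) for a, b in zip(seq, seq[1:]))
  (seq.zip seq.tail).foldl (fun acc p => acc + |p.2 - p.1|) 0

-- ===== PRECONDITION & SPEC =====
def Spec_calc_py (A : List Int) (first : Int) (flip : Bool) (out : Int) : Prop := out = calc_py_alt A first flip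
instance (A : List Int) (first : Int) (flip : Bool) (out : Int) : Decidable (Spec_calc_py A first flip out) := by unfold Spec_calc_py; infer_instance

-- ===== CLAIM =====
def Claim_equal_calc_py : Prop := ∀ (A : List Int) (first : Int) (flip : Bool), Dom_calc_py A first flip → Spec_calc_py A first flip (calc_py A first flip)

-- ===== LEMMAS AND PROOFS =====

-- the zig-zag visiting order A follows, stated structurally
def zig (q : List Int) (flip : Bool) : List Int :=
  if h : q = [] then []
  else if flip then q.head h :: zig q.tail (!flip)
  else q.getLast h :: zig q.dropLast (!flip)
termination_by q.length
decreasing_by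
  all_goals rcases q with _ | ⟨x, xs⟩
  · exact absurd rfl h
  · simp
  · exact absurd rfl h
  · simp [List.length_dropLast]

def pairSum (cur : Int) : List Int → Int
  | [] => 0
  | a :: rest => |a - cur| + pairSum a rest

-- the interleaving of two lists, first element from the first list
def inter : List Int → List Int → List Int
  | [], ys => ys
  | x :: xs, ys => x :: inter ys xs
termination_by xs ys => xs.length + ys.length
decreasing_by simp; omega

theorem calcLoop_eq_pairSum (n : Nat) : ∀ (q : List Int), q.length = n → ∀ (ans cur : Int) (flip : Bool),
    calcLoop q ans cur flip = ans + pairSum cur (zig q flip) := by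
  induction n with
  | zero =>
    intro q hq ans cur flip
    have hq : q = [] := by simpa using hq
    subst hq
    simp [calcLoop, zig, pairSum]
  | succ n ih =>
    intro q hq ans cur flip
    have hne : q ≠ [] := by intro h; subst h; simp at hq
    rw [calcLoop, zig, dif_neg hne, dif_neg hne]
    cases flip with
    | true =>
      simp only [if_true, Bool.not_true]
      rw [ih q.tail (by cases q with | nil => exact absurd rfl hne | cons x xs => simpa using hq),
        pairSum, add_assoc]
    | false =>
      simp only [Bool.false_eq_true, if_false, Bool.not_false]
      rw [ih q.dropLast (by simp [List.length_dropLast, hq]),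
        pairSum, add_assoc]

theorem zipFold_eq_pairSum (l : List Int) (cur acc : Int) :
    (((cur :: l).zip l).foldl (fun acc p => acc + |p.2 - p.1|) acc) = acc + pairSum cur l := by
  induction l generalizing cur acc with
  | nil => simp [pairSum]
  | cons a rest ih =>
    rw [List.zip_cons_cons, List.foldl_cons, ih, pairSum]
    ring_nf

-- the zig-zag order is the interleaving of the two slices B builds
theorem zig_eq_inter (n : Nat) : ∀ (q : List Int), q.length = n →
    zig q true = inter (q.take ((q.length + 1) / 2)) ((q.drop ((q.length + 1) / 2)).reverse) ∧
    zig q false = inter ((q.drop (q.length / 2)).reverse) (q.take (q.length / 2)) := by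
  induction n with
  | zero =>
    intro q hq
    have hq : q = [] := by simpa using hq
    subst hq
    simp [zig, inter]
  | succ n ih =>
    intro q hq
    have hne : q ≠ [] := by intro h; subst h; simp at hq
    constructor
    · -- flip = true: q = x :: t, take head
      rcases q with _ | ⟨x, t⟩
      · exact absurd rfl hne
      have ht : t.length = n := by simpa using hq
      rw [zig, dif_neg hne]
      simp only [if_true, Bool.not_true, List.head_cons, List.tail_cons]
      rw [(ih t ht).2]
      have hlen : (x :: t).length = n + 1 := hq
      have e1 : ((x :: t).length + 1) / 2 = t.length / 2 + 1 := by
        simp only [List.length_cons]; omega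
      rw [e1, List.take_succ_cons, List.drop_succ_cons, inter]
    · -- flip = false: split off the last element
      have hlast := List.dropLast_concat_getLast hne
      set d := q.dropLast with hd
      set z := q.getLast hne with hz
      rw [zig, dif_neg hne]
      simp only [Bool.false_eq_true, if_false, Bool.not_false]
      have hdl : d.length = n := by
        rw [hd, List.length_dropLast, hq]; omega
      rw [(ih d hdl).1, hdl]
      set m := q.length / 2 with hm
      have hn2 : m ≤ d.length := by
        rw [hm, hq, hdl]; omega
      have e2 : (n + 1) / 2 = m := by rw [hm, hq]
      have hqsplit : q = d ++ [z] := (hlast).symm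
      have htake : q.take m = d.take m := by
        conv_lhs => rw [hqsplit]
        rw [List.take_append_of_le_length hn2]
      have hdrop : q.drop m = d.drop m ++ [z] := by
        conv_lhs => rw [hqsplit]
        rw [List.drop_append_of_le_length hn2]
      rw [htake, hdrop, List.reverse_append, List.reverse_singleton, List.singleton_append,
        inter, e2]

-- B's zip-fold + leftover equals the interleaving (lengths differ by at most one)
theorem flat_leftover_eq_inter : ∀ (ys xs : List Int), ys.length ≤ xs.length → xs.length ≤ ys.length + 1 →
    ((xs.zip ys).flatMap (fun p => [p.1, p.2])) ++ (if ys.length < xs.length then [xs.getLastD 0] else []) = inter xs ys := by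
  intro ys
  induction ys with
  | nil =>
    intro xs h1 h2
    rcases xs with _ | ⟨a, as⟩
    · simp [inter]
    · have : as = [] := by
        rcases as with _ | _
        · rfl
        · simp at h2
      subst this
      simp [inter]
  | cons y ys' ih =>
    intro xs h1 h2
    rcases xs with _ | ⟨x, xs'⟩
    · simp at h1
    · have h1' : ys'.length ≤ xs'.length := by simpa using h1
      have h2' : xs'.length ≤ ys'.length + 1 := by simpa using h2
      have hguard : (ys'.length < xs'.length) = ((y :: ys').length < (x :: xs').length) := by
        simp
      rw [List.zip_cons_cons, List.flatMap_cons]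
      have hlast : (if (y :: ys').length < (x :: xs').length then [(x :: xs').getLastD 0] else [])
          = (if ys'.length < xs'.length then [xs'.getLastD 0] else []) := by
        by_cases h : ys'.length < xs'.length
        · rw [if_pos h, if_pos (by simpa using h)]
          rcases xs' with _ | ⟨a, l⟩
          · simp at h
          · simp
        · rw [if_neg h, if_neg (by simpa using h)]
      rw [hlast, List.append_assoc, ih xs' h1' h2', inter, inter]
      simp

-- ===== VERDICT =====
theorem calc_py_spec : Claim_equal_calc_py := by
  intro A first flip _
  show calc_py A first flip = calc_py_alt A first flip
  unfold calc_py calc_py_alt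
  rw [calcLoop_eq_pairSum A.length A rfl]
  simp only []
  set nn := A.length with hnn
  have hk : PySem.Int.floordiv ((nn : Int) + 1) 2 = (((nn + 1) / 2 : Nat) : Int) := by
    have := PySem.Int.floordiv_natCast (nn + 1) 2
    push_cast at this ⊢
    exact this
  have hnk : (nn : Int) - (((nn + 1) / 2 : Nat) : Int) = ((nn / 2 : Nat) : Int) := by
    have h1 : (nn + 1) / 2 + nn / 2 = nn := by omega
    push_cast
    omega
  cases flip with
  | true =>
    simp only [if_true, hk]
    rw [PySem.List.slice_to_natCast, PySem.List.slice_from_natCast]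
    have hxs : (A.take ((nn + 1) / 2)).length = (nn + 1) / 2 := by
      rw [List.length_take]; omega
    have hys : ((A.drop ((nn + 1) / 2)).reverse).length = nn - (nn + 1) / 2 := by
      rw [List.length_reverse, List.length_drop]
    have h1 : ((A.drop ((nn + 1) / 2)).reverse).length ≤ (A.take ((nn + 1) / 2)).length := by
      rw [hxs, hys]; omega
    have h2 : (A.take ((nn + 1) / 2)).length ≤ ((A.drop ((nn + 1) / 2)).reverse).length + 1 := by
      rw [hxs, hys]; omega
    rw [PySem.List.foldl_append_eq_flatMap]
    rw [(zig_eq_inter nn A hnn.symm).1, ← hnn]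
    rw [← flat_leftover_eq_inter _ _ h1 h2]
    by_cases hg : ((A.drop ((nn + 1) / 2)).reverse).length < (A.take ((nn + 1) / 2)).length
    all_goals
      simp only [hg, if_pos, if_false]
      simp only [List.nil_append, List.cons_append, List.append_nil, List.tail_cons]
      rw [zipFold_eq_pairSum]
  | false =>
    simp only [Bool.false_eq_true, if_false, hk, hnk]
    rw [PySem.List.slice_to_natCast, PySem.List.slice_from_natCast]
    have hxs : ((A.drop (nn / 2)).reverse).length = nn - nn / 2 := by
      rw [List.length_reverse, List.length_drop]
    have hys : (A.take (nn / 2)).length = nn / 2 := by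
      rw [List.length_take]; omega
    have h1 : (A.take (nn / 2)).length ≤ ((A.drop (nn / 2)).reverse).length := by
      rw [hxs, hys]; omega
    have h2 : ((A.drop (nn / 2)).reverse).length ≤ (A.take (nn / 2)).length + 1 := by
      rw [hxs, hys]; omega
    rw [PySem.List.foldl_append_eq_flatMap]
    rw [(zig_eq_inter nn A hnn.symm).2, ← hnn]
    rw [← flat_leftover_eq_inter _ _ h1 h2]
    by_cases hg : (A.take (nn / 2)).length < ((A.drop (nn / 2)).reverse).length
    all_goals
      simp only [hg, if_pos, if_false]
      simp only [List.nil_append, List.cons_append, List.append_nil, List.tail_cons]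
      rw [zipFold_eq_pairSum]
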